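-- pv_equiv track=rewrite | github.com/SteelDrEgg/easyebay | easyebay/search.py | _removeExtraSpace
-- ===== SOURCE A (Python) =====
-- def _removeExtraSpace(text):
--     '''
--     Remove extra spaces in the end of a string
--     :param text: string
--     :return: string
--     '''
--     if not text:
--         return text
--     new = ""
--     for charIndex in range(len(text)):
--         if (charIndex < len(text) - 1 and text[charIndex] == " " and text[charIndex + 1] == " ") or (
--                 text[charIndex] == " " and charIndex == len(text) - 1):
--             continue
--         else:
--             new += text[charIndex]
--     return new
-- ===== SOURCE B (Python) =====
-- import re
--
-- def _removeExtraSpace(text):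
--     if not text:
--         return text
--     return re.sub(' +', ' ', text).rstrip(' ')
-- ===== Notes on version B (the rewrite author's own statement) =====
-- stated objective: faster
-- what changed: Replaced the index-based loop with lookahead (building the result by repeated string concatenation) by a single regex substitution collapsing each run of spaces followed by a right-strip of the trailing space.
import Mathlib
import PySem

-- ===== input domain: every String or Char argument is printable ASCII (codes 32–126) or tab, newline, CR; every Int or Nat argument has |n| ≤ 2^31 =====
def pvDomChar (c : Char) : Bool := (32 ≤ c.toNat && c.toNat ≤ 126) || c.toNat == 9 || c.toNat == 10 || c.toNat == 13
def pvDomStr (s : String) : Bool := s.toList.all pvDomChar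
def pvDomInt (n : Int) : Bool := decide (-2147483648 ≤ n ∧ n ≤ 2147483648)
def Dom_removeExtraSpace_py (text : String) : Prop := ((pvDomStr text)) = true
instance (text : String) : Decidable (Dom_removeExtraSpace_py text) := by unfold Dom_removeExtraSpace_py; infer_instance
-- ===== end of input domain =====

-- B replaces A's index/lookahead loop by one regex substitution collapsing space runs plus rstrip(' ') (idiomatic).


-- ===== PORT A =====
-- loop body of A: for charIndex in range(len(text)): skip text[i] when it is a space
-- followed by a space, or a trailing space; indices are always in range, so
-- text[i] is ported as cs.getD i ' ' (exact: 0 ≤ i < len(text)).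
def stepA (cs : List Char) (n : Nat) (new : List Char) (i : Nat) : List Char :=
  if (i < n - 1 ∧ cs.getD i ' ' = ' ' ∧ cs.getD (i + 1) ' ' = ' ') ∨
     (cs.getD i ' ' = ' ' ∧ i = n - 1) then new
  else new ++ [cs.getD i ' ']

def removeExtraSpace_py (text : String) : String :=
  if text = "" then text
  else
    let cs := text.toList
    String.ofList ((List.range cs.length).foldl (stepA cs cs.length) [])

-- ===== PORT B =====
-- re.sub(' +', ' ', text): each maximal run of literal spaces becomes one space
-- (exact hand-port of this specific regex over List Char).
def collapseSp : List Char → List Char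
  | [] => []
  | c :: rest =>
      if c = ' ' then ' ' :: collapseSp (rest.dropWhile (· = ' '))
      else c :: collapseSp rest
termination_by l => l.length
decreasing_by
  · have := List.length_dropWhile_le (p := fun c => decide (c = ' ')) (l := rest)
    simp; omega
  · simp

-- .rstrip(' '): drop trailing literal spaces (exact).
def rstripSp (l : List Char) : List Char :=
  (l.reverse.dropWhile (· = ' ')).reverse

def removeExtraSpace_py_alt (text : String) : String :=
  if text = "" then text
  else String.ofList (rstripSp (collapseSp text.toList))

-- ===== PRECONDITION & SPEC =====
def Spec_removeExtraSpace_py (text : String) (out : String) : Prop := out = removeExtraSpace_py_alt text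
instance (text : String) (out : String) : Decidable (Spec_removeExtraSpace_py text out) := by unfold Spec_removeExtraSpace_py; infer_instance

-- ===== CLAIM (what is proved, stated in full; the proofs are below) =====
def Claim_equal_removeExtraSpace_py : Prop := ∀ (text : String), Dom_removeExtraSpace_py text → Spec_removeExtraSpace_py text (removeExtraSpace_py text)

-- ===== LEMMAS AND PROOFS =====

-- common characterisation: keep a char unless it is a space followed by a space,
-- or a trailing space
theorem pvFoldlCongrMem {α β : Type} (l : List β) (f g : α → β → α)
    (h : ∀ a b, b ∈ l → f a b = g a b) : ∀ init, l.foldl f init = l.foldl g init := by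
  induction l with
  | nil => intro init; rfl
  | cons x t ih =>
      intro init
      simp only [List.foldl_cons]
      rw [h init x (by simp)]
      exact ih (fun a b hb => h a b (by simp [hb])) _

def keepG : List Char → List Char
  | [] => []
  | [c] => if c = ' ' then [] else [c]
  | c :: d :: rest => (if c = ' ' ∧ d = ' ' then [] else [c]) ++ keepG (d :: rest)

theorem stepA_shift (c : Char) (cs' : List Char) (acc : List Char) (j : Nat)
    (hj : j < cs'.length) :
    stepA (c :: cs') (cs'.length + 1) acc (j + 1) = stepA cs' cs'.length acc j := by
  unfold stepA
  have e1 : (j + 1 < cs'.length + 1 - 1) ↔ (j < cs'.length - 1) := by omega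
  have e2 : (j + 1 = cs'.length + 1 - 1) ↔ (j = cs'.length - 1) := by omega
  simp only [List.getD_cons_succ, e1, e2]

theorem foldA (cs : List Char) (acc : List Char) :
    (List.range cs.length).foldl (stepA cs cs.length) acc = acc ++ keepG cs := by
  induction cs generalizing acc with
  | nil => simp [keepG]
  | cons c cs' ih =>
      have hrange : List.range (cs'.length + 1)
          = 0 :: (List.range cs'.length).map (· + 1) := by
        simpa [Nat.succ_eq_add_one] using (List.range_succ_eq_map (n := cs'.length))
      have hmap : ∀ a : List Char,
          ((List.range cs'.length).map (· + 1)).foldl (stepA (c :: cs') (cs'.length + 1)) a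
            = (List.range cs'.length).foldl (stepA cs' cs'.length) a := by
        intro a
        rw [List.foldl_map]
        exact pvFoldlCongrMem (List.range cs'.length) _ _
          (fun b j hj => stepA_shift c cs' b j (List.mem_range.mp hj)) a
      show (List.range (cs'.length + 1)).foldl (stepA (c :: cs') (cs'.length + 1)) acc
          = acc ++ keepG (c :: cs')
      rw [hrange]
      simp only [List.foldl_cons]
      rw [hmap, ih]
      cases cs' with
      | nil =>
          by_cases hc : c = ' ' <;> simp [stepA, keepG, hc]
      | cons d r =>
          by_cases hc : c = ' ' <;> by_cases hd : d = ' ' <;>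
            simp [stepA, keepG, hc, hd]

theorem rstripSp_cons (c : Char) (l : List Char) :
    rstripSp (c :: l) = if c = ' ' ∧ rstripSp l = [] then [] else c :: rstripSp l := by
  unfold rstripSp
  rw [List.reverse_cons, List.dropWhile_append]
  by_cases h : (l.reverse.dropWhile (· = ' ')) = []
  · by_cases hc : c = ' ' <;> simp [h, hc, List.dropWhile]
  · simp [h, List.isEmpty_iff, List.reverse_eq_nil_iff]

theorem keepG_cons_ne (c : Char) (r : List Char) (hc : c ≠ ' ') :
    keepG (c :: r) = c :: keepG r := by
  cases r with
  | nil => simp [keepG, hc]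
  | cons d s => simp [keepG, hc]

theorem keepG_ne_nil_of_head_ne (c : Char) (r : List Char) (hc : c ≠ ' ') :
    keepG (c :: r) ≠ [] := by
  rw [keepG_cons_ne c r hc]; simp

theorem rstrip_collapse (cs : List Char) : rstripSp (collapseSp cs) = keepG cs := by
  induction cs with
  | nil => simp [collapseSp, rstripSp, keepG]
  | cons c rest ih =>
      by_cases hc : c = ' '
      · subst hc
        cases rest with
        | nil => simp [collapseSp, rstripSp, keepG, List.dropWhile]
        | cons d r =>
            by_cases hd : d = ' '
            · subst hd
              have hcol : collapseSp (' ' :: ' ' :: r) = collapseSp (' ' :: r) := by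
                simp [collapseSp, List.dropWhile]
              rw [hcol, ih]
              simp [keepG]
            · have hcol : collapseSp (' ' :: d :: r) = ' ' :: collapseSp (d :: r) := by
                simp [collapseSp, List.dropWhile, hd]
              rw [hcol, rstripSp_cons, ih]
              have hne : keepG (d :: r) ≠ [] := keepG_ne_nil_of_head_ne d r hd
              simp [keepG, hd, hne]
      · have hcol : collapseSp (c :: rest) = c :: collapseSp rest := by
          simp [collapseSp, hc]
        rw [hcol, rstripSp_cons, ih, keepG_cons_ne c rest hc]
        simp [hc]

-- ===== VERDICT (by name: the statement is the Claim_ definition above) =====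
theorem removeExtraSpace_py_spec : Claim_equal_removeExtraSpace_py := by
  intro text _
  unfold Spec_removeExtraSpace_py removeExtraSpace_py removeExtraSpace_py_alt
  by_cases h : text = ""
  · simp [h]
  · simp only [h, if_false]
    rw [foldA, rstrip_collapse]
    simp
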